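-- pv_equiv track=rewrite | github.com/NVlabs/SOLAR | solar/einsum/ops/shape_ops.py | generate_dim_labels
-- ===== SOURCE A (Python) =====
-- import string
-- from typing import Any, Dict, List, Optional
--
-- def generate_dim_labels(num_dims: int, prefix: str = "") -> List[str]:
--     """Generate dimension labels that support more than 26 dimensions.
--
--     Uses a char+number scheme:
--     - First 26 dims: A, B, C, ..., Z (or with prefix: I0, I1, ..., I25)
--     - Beyond 26: A0, A1, ..., Z0, Z1, ... (or I26, I27, ...)
--
--     Args:
--         num_dims: Number of dimension labels to generate.
--         prefix: Optional uppercase prefix for labels (e.g., "I" for input, "O" for output).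
--
--     Returns:
--         List of dimension label strings.
--     """
--     if prefix:
--         # Use uppercase prefix + number scheme: I0, I1, I2, ... or O0, O1, O2, ...
--         prefix_upper = prefix.upper()
--         return [f"{prefix_upper}{i}" for i in range(num_dims)]
--
--     # Use letter-based scheme with numbers for overflow
--     labels = []
--     for i in range(num_dims):
--         if i < 26:
--             # First 26: A, B, C, ..., Z
--             labels.append(string.ascii_uppercase[i])
--         else:
--             # Beyond 26: A0, A1, ..., Z0, Z1, A2, ...
--             letter_idx = (i - 26) % 26
--             number = (i - 26) // 26
--             labels.append(f"{string.ascii_uppercase[letter_idx]}{number}")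
--     return labels
-- ===== SOURCE B (Python) =====
-- import string
--
--
-- def generate_dim_labels(num_dims: int, prefix: str = ""):
--     if prefix:
--         prefix_upper = prefix.upper()
--         return [f"{prefix_upper}{i}" for i in range(num_dims)]
--
--     # Block-by-block generation: plain letters first, then letter+number blocks.
--     labels = []
--     for ch in string.ascii_uppercase:
--         if len(labels) >= num_dims:
--             break
--         labels.append(ch)
--     number = 0
--     while len(labels) < num_dims:
--         for ch in string.ascii_uppercase:
--             if len(labels) == num_dims:
--                 break
--             labels.append(f"{ch}{number}")
--         number += 1
--     return labels
-- ===== Notes on version B (the rewrite author's own statement) =====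
-- stated objective: alternative
-- what changed: B generates the non-prefix labels block by block (single letters first, then an outer counter with an inner loop over the alphabet) instead of computing a per-index divmod into the alphabet.
import Mathlib
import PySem

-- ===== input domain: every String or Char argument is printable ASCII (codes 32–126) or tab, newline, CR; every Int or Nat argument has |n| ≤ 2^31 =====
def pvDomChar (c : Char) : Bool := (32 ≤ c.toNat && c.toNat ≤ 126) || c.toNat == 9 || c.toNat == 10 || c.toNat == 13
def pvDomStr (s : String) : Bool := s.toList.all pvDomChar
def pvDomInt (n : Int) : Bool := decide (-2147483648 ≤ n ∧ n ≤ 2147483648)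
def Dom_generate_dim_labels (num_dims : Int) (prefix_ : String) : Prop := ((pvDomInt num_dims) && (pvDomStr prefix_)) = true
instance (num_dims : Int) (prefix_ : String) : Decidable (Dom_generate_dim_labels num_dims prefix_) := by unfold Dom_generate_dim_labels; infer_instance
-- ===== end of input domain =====

-- B generates the labels block by block (letters, then letter+number blocks) instead of
-- computing a divmod per index; same output, alternative decomposition.

-- string.ascii_uppercase
def pvAscii : List Char := "ABCDEFGHIJKLMNOPQRSTUVWXYZ".toList

-- ===== PORT A =====
-- Literal port of A: prefix branch = comprehension over range(num_dims);
-- else branch = a fold appending one label per index, with divmod for i ≥ 26.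
-- string indexing via PySem.Str.pyGet?; the index is always in range, so .getD 'A' is never taken.
def generate_dim_labels (num_dims : Int) (prefix_ : String) : List String :=
  if prefix_ ≠ "" then
    (PySem.List.pyRange 0 num_dims 1).map
      (fun i => PySem.Str.upper prefix_ ++ PySem.Int.toStr i)
  else
    (PySem.List.pyRange 0 num_dims 1).foldl
      (fun labels i =>
        if i < 26 then
          labels ++ [String.mk [(PySem.Str.pyGet? "ABCDEFGHIJKLMNOPQRSTUVWXYZ" i).getD 'A']]
        else
          labels ++ [String.mk [(PySem.Str.pyGet? "ABCDEFGHIJKLMNOPQRSTUVWXYZ"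
                        (PySem.Int.mod (i - 26) 26)).getD 'A'] ++
                     PySem.Int.toStr (PySem.Int.floordiv (i - 26) 26)])
      []

-- ===== PORT B =====
-- 'for ch in string.ascii_uppercase: if len(labels) >= num_dims: break; labels.append(ch)'
def pvLetters (n : Int) (labels : List String) (chars : List Char) : List String :=
  match chars with
  | [] => labels
  | c :: rest =>
      if (labels.length : Int) ≥ n then labels
      else pvLetters n (labels ++ [String.mk [c]]) rest

-- inner 'for ch in string.ascii_uppercase: if len(labels) == num_dims: break; labels.append(f"{ch}{number}")'
def pvBlock (n : Int) (number : Int) (labels : List String) (chars : List Char) : List String :=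
  match chars with
  | [] => labels
  | c :: rest =>
      if (labels.length : Int) = n then labels
      else pvBlock n number (labels ++ [String.mk [c] ++ PySem.Int.toStr number]) rest

theorem pvBlock_length_ge (n number : Int) (labels : List String) (chars : List Char) :
    labels.length ≤ (pvBlock n number labels chars).length := by
  induction chars generalizing labels with
  | nil => simp [pvBlock]
  | cons c rest ih =>
      simp only [pvBlock]
      split
      · exact le_refl _
      · exact le_trans (by simp) (ih (labels ++ [String.mk [c] ++ PySem.Int.toStr number]))

theorem pvBlock_length_gt (n number : Int) (labels : List String) (chars : List Char)
    (h : (labels.length : Int) < n) (hc : chars ≠ []) :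
    labels.length < (pvBlock n number labels chars).length := by
  cases chars with
  | nil => exact absurd rfl hc
  | cons c rest =>
      simp only [pvBlock]
      split
      · omega
      · exact lt_of_lt_of_le (by simp)
          (pvBlock_length_ge n number (labels ++ [String.mk [c] ++ PySem.Int.toStr number]) rest)

-- 'while len(labels) < num_dims: <inner for>; number += 1'
def pvWhile (n : Int) (number : Int) (labels : List String) : List String :=
  if h : (labels.length : Int) < n then
    pvWhile n (number + 1) (pvBlock n number labels pvAscii)
  else labels
termination_by (n - labels.length).toNat
decreasing_by
  have := pvBlock_length_gt n number labels pvAscii h (by decide)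
  omega

def generate_dim_labels_alt (num_dims : Int) (prefix_ : String) : List String :=
  if prefix_ ≠ "" then
    (PySem.List.pyRange 0 num_dims 1).map
      (fun i => PySem.Str.upper prefix_ ++ PySem.Int.toStr i)
  else
    pvWhile num_dims 0 (pvLetters num_dims [] pvAscii)

-- ===== PRECONDITION & SPEC =====
def Spec_generate_dim_labels (num_dims : Int) (prefix_ : String) (out : List String) : Prop := out = generate_dim_labels_alt num_dims prefix_
instance (num_dims : Int) (prefix_ : String) (out : List String) : Decidable (Spec_generate_dim_labels num_dims prefix_ out) := by unfold Spec_generate_dim_labels; infer_instance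

-- ===== CLAIM (what is proved, stated in full; the proofs are below) =====
def Claim_equal_generate_dim_labels : Prop := ∀ (num_dims : Int) (prefix_ : String), Dom_generate_dim_labels num_dims prefix_ → Spec_generate_dim_labels num_dims prefix_ (generate_dim_labels num_dims prefix_)

-- ===== LEMMAS AND PROOFS =====

-- canonical label of dimension j
def pvLab (j : Nat) : String :=
  if j < 26 then String.mk [pvAscii.getD j 'A']
  else String.mk [pvAscii.getD ((j - 26) % 26) 'A'] ++ PySem.Int.toStr ((((j - 26) / 26 : Nat)) : Int)

theorem pvAscii_length : pvAscii.length = 26 := by decide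

-- foldl whose body appends one element in each branch of an if
theorem foldl_append_ite {α β : Type} (p : α → Prop) [DecidablePred p] (f g : α → β)
    (l : List α) (acc : List β) :
    l.foldl (fun acc x => if p x then acc ++ [f x] else acc ++ [g x]) acc
      = acc ++ l.map (fun x => if p x then f x else g x) := by
  induction l generalizing acc with
  | nil => simp
  | cons x xs ih => simp only [List.foldl, List.map]; split <;> simp [ih]

theorem ascii_at (j : Nat) :
    (PySem.Str.pyGet? "ABCDEFGHIJKLMNOPQRSTUVWXYZ" (j : Int)).getD 'A' = pvAscii.getD j 'A' := by
  simp [List.getD, pvAscii]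

-- A's else branch computes the canonical list.
theorem a_else_eq (n : Int) :
    (PySem.List.pyRange 0 n 1).foldl
      (fun labels i =>
        if i < 26 then
          labels ++ [String.mk [(PySem.Str.pyGet? "ABCDEFGHIJKLMNOPQRSTUVWXYZ" i).getD 'A']]
        else
          labels ++ [String.mk [(PySem.Str.pyGet? "ABCDEFGHIJKLMNOPQRSTUVWXYZ"
                        (PySem.Int.mod (i - 26) 26)).getD 'A'] ++
                     PySem.Int.toStr (PySem.Int.floordiv (i - 26) 26)])
      []
    = (List.range n.toNat).map pvLab := by
  rw [foldl_append_ite (fun i => i < (26 : Int))]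
  rw [PySem.List.pyRange_one]
  simp only [List.nil_append, List.map_map, Int.sub_zero]
  apply List.map_congr_left
  intro k _
  simp only [Function.comp_apply, zero_add]
  by_cases hk : k < 26
  · have hki : ((k : Int)) < 26 := by exact_mod_cast hk
    rw [if_pos hki, ascii_at k]
    simp only [pvLab, if_pos hk]
  · have hki : ¬ ((k : Int)) < 26 := by exact_mod_cast hk
    have hc : ((k : Int)) - 26 = ((k - 26 : Nat) : Int) := by omega
    have hm : PySem.Int.mod ((k : Int) - 26) 26 = (((k - 26) % 26 : Nat) : Int) := by
      rw [PySem.Int.mod_eq_emod_of_pos (by norm_num), hc]; omega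
    have hd : PySem.Int.floordiv ((k : Int) - 26) 26 = (((k - 26) / 26 : Nat) : Int) := by
      rw [PySem.Int.floordiv_eq_ediv_of_pos (by norm_num), hc]; omega
    rw [if_neg hki, hm, hd, ascii_at _]
    simp only [pvLab, if_neg hk]

-- take-of-letters = canonical prefix
theorem letters_take (t : Nat) :
    (pvAscii.take t).map (fun c => String.mk [c]) = (List.range (min t 26)).map pvLab := by
  apply List.ext_getElem
  · simp [pvAscii_length]
  · intro j h1 h2
    have hj : j < 26 := by simp [pvAscii_length] at h1; omega
    have hlen : j < pvAscii.length := by rw [pvAscii_length]; omega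
    simp [List.getElem_take, List.getElem_range, pvLab, hj,
      List.getElem?_eq_getElem hlen]

-- take-of-a-block = canonical slice starting at 26 + 26*m
theorem block_take (t m : Nat) :
    (pvAscii.take t).map (fun c => String.mk [c] ++ PySem.Int.toStr (m : Int))
      = (List.range' (26 + 26 * m) (min t 26)).map pvLab := by
  apply List.ext_getElem
  · simp [pvAscii_length]
  · intro j h1 h2
    have hj : j < 26 := by simp [pvAscii_length] at h1; omega
    have hnlt : ¬ (26 + 26 * m + j < 26) := by omega
    have e1 : 26 + 26 * m + j - 26 = 26 * m + j := by omega
    have e2 : (26 * m + j) % 26 = j := by omega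
    have e3 : (26 * m + j) / 26 = m := by omega
    have hlen : j < pvAscii.length := by rw [pvAscii_length]; omega
    simp [List.getElem_take, List.getElem_range', pvLab, hnlt, e1, e2, e3,
      List.getElem?_eq_getElem hlen]

theorem pvBlock_eq (n number : Int) (labels : List String) (chars : List Char)
    (hle : (labels.length : Int) ≤ n) :
    pvBlock n number labels chars
      = labels ++ (chars.take ((n - labels.length).toNat)).map
          (fun c => String.mk [c] ++ PySem.Int.toStr number) := by
  induction chars generalizing labels with
  | nil => simp [pvBlock]
  | cons c rest ih =>
      simp only [pvBlock]
      split
      · have h0 : (n - labels.length).toNat = 0 := by omega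
        simp [h0]
      · rename_i hne
        have hlt : (labels.length : Int) < n := by
          rcases lt_or_eq_of_le hle with h | h
          · exact h
          · exact absurd h hne
        have h1 : (n - labels.length).toNat = (n - (labels.length + 1 : Nat)).toNat + 1 := by
          push_cast; omega
        have hrec := ih (labels ++ [String.mk [c] ++ PySem.Int.toStr number]) (by simp; omega)
        rw [hrec]
        simp [h1, List.append_assoc]

theorem pvLetters_eq (n : Int) (labels : List String) (chars : List Char) :
    pvLetters n labels chars
      = labels ++ (chars.take ((n - labels.length).toNat)).map (fun c => String.mk [c]) := by
  induction chars generalizing labels with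
  | nil => simp [pvLetters]
  | cons c rest ih =>
      simp only [pvLetters]
      split
      · have h0 : (n - labels.length).toNat = 0 := by omega
        simp [h0]
      · have h1 : (n - labels.length).toNat = (n - (labels.length + 1 : Nat)).toNat + 1 := by
          push_cast; omega
        rw [ih]
        simp [h1, List.append_assoc]

theorem range_append_range' (a k : Nat) :
    List.range a ++ List.range' a k = List.range (a + k) := by
  rw [List.range_eq_range', List.range_eq_range']
  simpa using (List.range'_append_1 (s := 0) (m := a) (n := k))

theorem pvWhile_eq (n : Int) : ∀ (number : Int) (labels : List String),
    (labels.length : Int) ≤ n →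
    labels = (List.range labels.length).map pvLab →
    ((labels.length : Int) = n ∨
      (labels.length = 26 + 26 * number.toNat ∧ 0 ≤ number)) →
    pvWhile n number labels = (List.range n.toNat).map pvLab := by
  intro number labels
  induction number, labels using pvWhile.induct (n := n) with
  | case2 number labels h =>
      intro hle hlab _
      rw [pvWhile, dif_neg h]
      have he : labels.length = n.toNat := by omega
      rw [hlab, he]
  | case1 number labels h ih =>
      intro hle hlab hinv
      rw [pvWhile, dif_pos h]
      rcases hinv with he | ⟨hlen, hnum⟩
      · omega
      · have hnn : (number.toNat : Int) = number := Int.toNat_of_nonneg hnum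
        have hblock : pvBlock n number labels pvAscii
            = (List.range (labels.length + min (n - labels.length).toNat 26)).map pvLab := by
          rw [pvBlock_eq n number labels pvAscii hle]
          rw [← hnn, block_take ((n - labels.length).toNat) number.toNat]
          rw [hlab]
          conv_lhs => rw [hlen]
          rw [← List.map_append]
          congr 1
          rw [hlen]
          simp only [List.length_map, List.length_range]
          exact range_append_range' _ _
        apply ih
        · rw [hblock]
          simp only [List.length_map, List.length_range]
          omega
        · rw [hblock]
          simp
        · rw [hblock]
          simp only [List.length_map, List.length_range]
          by_cases hbig : (n - labels.length).toNat ≤ 26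
          · left; omega
          · right
            constructor
            · have : min (n - labels.length).toNat 26 = 26 := by omega
              rw [this, hlen]
              omega
            · omega

theorem b_else_eq (n : Int) :
    pvWhile n 0 (pvLetters n [] pvAscii) = (List.range n.toNat).map pvLab := by
  have hlet : pvLetters n [] pvAscii = (List.range (min n.toNat 26)).map pvLab := by
    rw [pvLetters_eq]
    simp only [List.length_nil, List.nil_append, Int.natCast_zero, Int.sub_zero]
    rw [letters_take]
  by_cases hn : n ≤ 0
  · have h0 : ¬ ((pvLetters n [] pvAscii).length : Int) < n := by omega
    rw [pvWhile, dif_neg h0, hlet]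
    have : min n.toNat 26 = n.toNat := by omega
    rw [this]
  · rw [hlet]
    apply pvWhile_eq n 0
    · simp only [List.length_map, List.length_range]
      omega
    · simp
    · simp only [List.length_map, List.length_range]
      by_cases hbig : n.toNat ≤ 26
      · left; omega
      · right
        constructor
        · omega
        · omega

-- ===== VERDICT (by name: the statement is the Claim_ definition above) =====
theorem generate_dim_labels_spec : Claim_equal_generate_dim_labels := by
  intro n p _
  unfold Spec_generate_dim_labels generate_dim_labels generate_dim_labels_alt
  split
  · rfl
  · rw [a_else_eq, b_else_eq]
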